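-- pv_equiv track=rewrite | github.com/KotonBads/LC-Solver | unscrambler.py | Vect2Int
-- ===== SOURCE A (Python) =====
-- def Vect2Int(vect):
--     pv = 0
--     f = 0
--     for i in range(len(vect)):
--         wip = (vect[i]*(2**pv))
--         f += wip
--         pv += 4
--     return f
-- ===== SOURCE B (Python) =====
-- def Vect2Int(vect):
--     f = 0
--     for v in reversed(vect):
--         f = f * 16 + v
--     return f
-- ===== Notes on version B (the rewrite author's own statement) =====
-- stated objective: faster
-- what changed: Replaces the forward loop that recomputes a growing power 2**pv each iteration with Horner's method over the reversed list (f = f*16 + v), eliminating the per-step big-power computation.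
import Mathlib
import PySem

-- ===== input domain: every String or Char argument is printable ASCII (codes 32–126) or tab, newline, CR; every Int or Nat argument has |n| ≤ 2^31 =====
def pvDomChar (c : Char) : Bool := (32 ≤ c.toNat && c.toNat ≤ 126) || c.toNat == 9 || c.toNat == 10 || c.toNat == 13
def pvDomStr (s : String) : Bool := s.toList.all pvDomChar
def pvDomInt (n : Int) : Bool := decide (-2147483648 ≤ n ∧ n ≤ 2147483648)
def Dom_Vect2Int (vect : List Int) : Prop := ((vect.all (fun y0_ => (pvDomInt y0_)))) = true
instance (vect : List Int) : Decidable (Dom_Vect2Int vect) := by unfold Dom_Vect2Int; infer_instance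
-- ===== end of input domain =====

-- B replaces the forward loop with a growing power-of-two exponent by Horner's method over the reversed list.
-- ===== PORT A =====
def Vect2Int (vect : List Int) : Int :=
  (vect.foldl (fun (s : Nat × Int) v => (s.1 + 4, s.2 + v * 2 ^ s.1)) (0, 0)).2

-- ===== PORT B =====
def Vect2Int_alt (vect : List Int) : Int :=
  vect.reverse.foldl (fun f v => f * 16 + v) 0

-- ===== PRECONDITION & SPEC =====
def Spec_Vect2Int (vect : List Int) (out : Int) : Prop := out = Vect2Int_alt vect
instance (vect : List Int) (out : Int) : Decidable (Spec_Vect2Int vect out) := by unfold Spec_Vect2Int; infer_instance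

-- ===== CLAIM (what is proved, stated in full; the proofs are below) =====
def Claim_equal_Vect2Int : Prop := ∀ (vect : List Int), Dom_Vect2Int vect → Spec_Vect2Int vect (Vect2Int vect)

-- ===== LEMMAS AND PROOFS =====

-- ===== VERDICT (by name: the statement is the Claim_ definition above) =====
lemma vect2int_foldl_eq (l : List Int) : ∀ (pv : Nat) (f : Int),
    (l.foldl (fun (s : Nat × Int) v => (s.1 + 4, s.2 + v * 2 ^ s.1)) (pv, f)).2
      = f + 2 ^ pv * l.foldr (fun x y => y * 16 + x) 0 := by
  induction l with
  | nil => intro pv f; simp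
  | cons v t ih =>
      intro pv f
      simp only [List.foldl_cons, List.foldr_cons, ih]
      rw [pow_add]
      ring

theorem Vect2Int_spec : Claim_equal_Vect2Int := by
  intro vect _
  show Vect2Int vect = Vect2Int_alt vect
  unfold Vect2Int Vect2Int_alt
  rw [List.foldl_reverse, vect2int_foldl_eq]
  simp
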